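-- pv_equiv track=rewrite | github.com/RomanBaitala/plactice_algo_labs_part_2 | src/lab_1/lab_1_lvl_3.py | peek_sequence
-- ===== SOURCE A (Python) =====
-- def peek_sequence(nums):
--     k = 1
--     cur_peek = 0
--     peek_s = []
--     cur_seq = []
--     while k < len(nums) - 1:
--         if nums[k - 1] < nums[k] and nums[k] > nums[k + 1]:
--             cur_peek = k
--             while cur_peek -1 >= 0 and nums[cur_peek] > nums[cur_peek - 1]:
--                 cur_seq.insert(0, nums[cur_peek - 1])
--                 cur_peek -= 1
--             cur_peek = k
--             cur_seq.append(nums[cur_peek])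
--             while cur_peek < len(nums) - 1 and nums[cur_peek] > nums[cur_peek + 1]:
--                 cur_seq.append(nums[cur_peek + 1])
--                 cur_peek += 1
--             if len(peek_s) < len(cur_seq):
--                 peek_s = [i for i in cur_seq]
--                 cur_seq = []
--             cur_seq = []
--         k += 1
--     return peek_s
-- ===== SOURCE B (Python) =====
-- def peek_sequence(nums):
--     n = len(nums)
--     up = [0] * n
--     down = [0] * n
--     for i in range(1, n):
--         if nums[i - 1] < nums[i]:
--             up[i] = up[i - 1] + 1
--     for i in range(n - 2, -1, -1):
--         if nums[i] > nums[i + 1]: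
--             down[i] = down[i + 1] + 1
--     best_len = 0
--     best_start = 0
--     for k in range(1, n - 1):
--         if up[k] and down[k] and up[k] + down[k] + 1 > best_len:
--             best_len = up[k] + down[k] + 1
--             best_start = k - up[k]
--     return nums[best_start:best_start + best_len]
-- ===== Notes on version B (the rewrite author's own statement) =====
-- stated objective: faster
-- what changed: Replaced A's per-peak outward expansion that rebuilds each mountain element by element with list.insert(0,...) (quadratic on a long ascent) by two linear passes precomputing up/down run-length arrays, one selection pass for the first strict maximum, and a single slice.
import Mathlib
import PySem

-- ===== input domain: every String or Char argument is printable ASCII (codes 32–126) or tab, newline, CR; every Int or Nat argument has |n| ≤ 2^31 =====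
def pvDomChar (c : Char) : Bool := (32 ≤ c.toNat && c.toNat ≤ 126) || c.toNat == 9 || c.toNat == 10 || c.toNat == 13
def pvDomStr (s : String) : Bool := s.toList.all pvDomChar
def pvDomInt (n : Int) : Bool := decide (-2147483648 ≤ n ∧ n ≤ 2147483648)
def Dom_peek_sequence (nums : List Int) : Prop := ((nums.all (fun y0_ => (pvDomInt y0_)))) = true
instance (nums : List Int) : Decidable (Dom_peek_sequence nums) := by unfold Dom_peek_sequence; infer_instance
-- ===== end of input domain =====

-- B replaces A's per-peak expansion with insert(0,..) (quadratic on one long ascent) by two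
-- linear passes of up/down run lengths plus one selection pass and a single slice (objective: faster).

-- ===== PORT A =====
-- all list accesses of A are guarded in range by the loop conditions, so pyGetD with default 0 is exact
def pvAget (nums : List Int) (i : Int) : Int := PySem.List.pyGetD nums i 0

-- inner 'while cur_peek - 1 >= 0 and nums[cur_peek] > nums[cur_peek - 1]' loop (cur_seq.insert(0, ·))
def pvAleft (nums : List Int) (cp : Int) (seq : List Int) : List Int :=
  if 0 ≤ cp - 1 ∧ pvAget nums (cp - 1) < pvAget nums cp then
    pvAleft nums (cp - 1) (pvAget nums (cp - 1) :: seq)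
  else seq
termination_by cp.toNat
decreasing_by omega

-- inner 'while cur_peek < len(nums) - 1 and nums[cur_peek] > nums[cur_peek + 1]' loop (cur_seq.append)
def pvAright (nums : List Int) (cp : Int) (seq : List Int) : List Int :=
  if cp < (nums.length : Int) - 1 ∧ pvAget nums (cp + 1) < pvAget nums cp then
    pvAright nums (cp + 1) (seq ++ [pvAget nums (cp + 1)])
  else seq
termination_by ((nums.length : Int) - cp).toNat
decreasing_by omega

-- outer 'while k < len(nums) - 1' loop carrying peek_s
def pvAloop (nums : List Int) (k : Int) (peek_s : List Int) : List Int :=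
  if k < (nums.length : Int) - 1 then
    if pvAget nums (k - 1) < pvAget nums k ∧ pvAget nums (k + 1) < pvAget nums k then
      let seq := pvAright nums k (pvAleft nums k [] ++ [pvAget nums k])
      pvAloop nums (k + 1) (if peek_s.length < seq.length then seq else peek_s)
    else pvAloop nums (k + 1) peek_s
  else peek_s
termination_by ((nums.length : Int) - k).toNat
decreasing_by all_goals omega

def peek_sequence (nums : List Int) : List Int := pvAloop nums 1 []

-- ===== PORT B =====
-- up[i] = length of the strict ascent ending at i (first pass of Source B), built left to right
def pvUpFrom (prev : Int) (pu : Nat) : List Int → List Nat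
  | [] => []
  | x :: xs => (if prev < x then pu + 1 else 0) :: pvUpFrom x (if prev < x then pu + 1 else 0) xs

def pvUp : List Int → List Nat
  | [] => []
  | x :: xs => 0 :: pvUpFrom x 0 xs

-- down[i] = length of the strict descent starting at i (second pass of Source B), built right to left
def pvDown : List Int → List Nat
  | [] => []
  | [_] => [0]
  | x :: y :: xs => (if y < x then (pvDown (y :: xs)).headD 0 + 1 else 0) :: pvDown (y :: xs)

-- selection pass 'for k in range(1, n-1)' keeping the first strict maximum; returns (best_len, best_start)
def pvSel (up dn : List Nat) (n k bl bs : Nat) : Nat × Nat :=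
  if k < n - 1 then
    if up.getD k 0 ≠ 0 ∧ dn.getD k 0 ≠ 0 ∧ bl < up.getD k 0 + dn.getD k 0 + 1 then
      pvSel up dn n (k + 1) (up.getD k 0 + dn.getD k 0 + 1) (k - up.getD k 0)
    else pvSel up dn n (k + 1) bl bs
  else (bl, bs)
termination_by n - k
decreasing_by all_goals omega

def peek_sequence_alt (nums : List Int) : List Int :=
  let n := nums.length
  let p := pvSel (pvUp nums) (pvDown nums) n 1 0 0
  PySem.List.slice nums (some (p.2 : Int)) (some ((p.2 : Int) + (p.1 : Int)))

-- ===== PRECONDITION & SPEC =====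
def Spec_peek_sequence (nums : List Int) (out : List Int) : Prop := out = peek_sequence_alt nums
instance (nums : List Int) (out : List Int) : Decidable (Spec_peek_sequence nums out) := by unfold Spec_peek_sequence; infer_instance

-- ===== CLAIM (what is proved, stated in full; the proofs are below) =====
def Claim_equal_peek_sequence : Prop := ∀ (nums : List Int), Dom_peek_sequence nums → Spec_peek_sequence nums (peek_sequence nums)

-- ===== LEMMAS AND PROOFS =====

-- abbreviations used only by the proofs
def pvG (nums : List Int) (i : Nat) : Int := nums.getD i 0
def pvU (nums : List Int) (i : Nat) : Nat := (pvUp nums).getD i 0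
def pvD (nums : List Int) (i : Nat) : Nat := (pvDown nums).getD i 0

theorem pvUpFrom_spec (xs : List Int) : ∀ (prev : Int) (pu : Nat) (i : Nat), i < xs.length →
    (pvUpFrom prev pu xs).getD i 0 =
      if (prev :: xs).getD i 0 < xs.getD i 0 then (pu :: pvUpFrom prev pu xs).getD i 0 + 1 else 0 := by
  induction xs with
  | nil => intro prev pu i h; simp at h
  | cons x xs ih =>
    intro prev pu i h
    cases i with
    | zero => simp [pvUpFrom]
    | succ i =>
      simp only [pvUpFrom, List.getD_cons_succ]
      rw [ih x (if prev < x then pu + 1 else 0) i (by simpa using h)]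

theorem pvU_succ (nums : List Int) (i : Nat) (h : i + 1 < nums.length) :
    pvU nums (i + 1) = if pvG nums i < pvG nums (i + 1) then pvU nums i + 1 else 0 := by
  cases nums with
  | nil => simp at h
  | cons x xs =>
    simp only [pvU, pvG, pvUp, List.getD_cons_succ]
    rw [pvUpFrom_spec xs x 0 i (by simpa using h)]

theorem pvU_le (nums : List Int) : ∀ i, pvU nums i ≤ i := by
  intro i
  induction i with
  | zero =>
    cases nums with
    | nil => simp [pvU, pvUp]
    | cons x xs => simp [pvU, pvUp]
  | succ i ih =>
    by_cases h : i + 1 < nums.length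
    · rw [pvU_succ nums i h]; split <;> omega
    · simp only [pvU]
      rw [List.getD_eq_default]
      · omega
      · have : (pvUp nums).length = nums.length := by
          cases nums with
          | nil => simp [pvUp]
          | cons x xs =>
            simp only [pvUp, List.length_cons]
            have : ∀ (ys : List Int) (p : Int) (u : Nat), (pvUpFrom p u ys).length = ys.length := by
              intro ys; induction ys with
              | nil => intro p u; simp [pvUpFrom]
              | cons y ys ih2 => intro p u; simp [pvUpFrom, ih2]
            simp [this]
        omega

theorem pvHeadD_getD (l : List Nat) : l.head?.getD 0 = l[0]?.getD 0 := by cases l <;> simp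

theorem pvD_succ (nums : List Int) : ∀ (i : Nat), i + 1 < nums.length →
    pvD nums i = if pvG nums (i + 1) < pvG nums i then pvD nums (i + 1) + 1 else 0 := by
  induction nums with
  | nil => intro i h; simp at h
  | cons x xs ih =>
    intro i h
    cases xs with
    | nil => simp at h
    | cons y ys =>
      cases i with
      | zero => simp [pvD, pvG, pvDown, pvHeadD_getD]
      | succ i =>
        simp only [pvD, pvG, pvDown, List.getD_cons_succ]
        exact ih i (by simpa using h)

theorem pvD_last (nums : List Int) : ∀ (i : Nat), i + 1 = nums.length → pvD nums i = 0 := by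
  induction nums with
  | nil => intro i h; simp at h
  | cons x xs ih =>
    intro i h
    cases xs with
    | nil =>
      have : i = 0 := by simpa using h
      subst this; simp [pvD, pvDown]
    | cons y ys =>
      cases i with
      | zero => simp at h
      | succ i =>
        simp only [pvD, pvDown, List.getD_cons_succ]
        exact ih i (by simpa using h)

theorem pvD_lt (nums : List Int) : ∀ (i : Nat), i < nums.length → i + pvD nums i < nums.length := by
  induction nums with
  | nil => intro i h; simp at h
  | cons x xs ih =>
    intro i h
    cases xs with
    | nil =>
      have : i = 0 := by simpa using h
      subst this; simp [pvD, pvDown]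
    | cons y ys =>
      cases i with
      | zero =>
        have h0 := ih 0 (by simp)
        have hh : (pvDown (y :: ys)).headD 0 = (pvDown (y :: ys)).getD 0 0 := by
          cases hys : pvDown (y :: ys) <;> simp [List.getD]
        simp only [pvD, pvDown, List.getD_cons_zero, List.length_cons] at *
        rw [hh]
        split <;> omega
      | succ i =>
        have hi := ih i (by simpa using h)
        simp only [pvD, pvDown, List.getD_cons_succ, List.length_cons] at *
        omega

theorem pvU_zero (nums : List Int) : pvU nums 0 = 0 := by
  cases nums <;> simp [pvU, pvUp]

theorem pvAget_nat (nums : List Int) (k : Nat) : pvAget nums (k : Int) = pvG nums k := by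
  simp [pvAget, pvG, PySem.List.pyGetD_natCast]

theorem pvGetElem?_drop_eq (nums : List Int) (k u : Nat) (hu : u ≤ k) (hk : k < nums.length) :
    (nums.drop (k - u))[u]? = some (pvG nums k) := by
  rw [List.getElem?_drop]
  have h : k - u + u = k := by omega
  rw [h, List.getElem?_eq_getElem hk, pvG, List.getD_eq_getElem _ _ hk]

theorem pvAleft_eq (nums : List Int) : ∀ (k : Nat), k < nums.length → ∀ seq,
    pvAleft nums (k : Int) seq = (nums.drop (k - pvU nums k)).take (pvU nums k) ++ seq := by
  intro k
  induction k with
  | zero =>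
    intro h seq
    rw [pvAleft, if_neg (by intro hc; have := hc.1; norm_num at this)]
    simp [pvU_zero]
  | succ k ih =>
    intro h seq
    have hk : k < nums.length := by omega
    have e : ((k + 1 : Nat) : Int) - 1 = ((k : Nat) : Int) := by push_cast; ring
    rw [pvAleft, e, pvAget_nat nums k, pvAget_nat nums (k + 1)]
    by_cases hc : pvG nums k < pvG nums (k + 1)
    · rw [if_pos ⟨by positivity, hc⟩, ih hk (pvG nums k :: seq)]
      have hU : pvU nums (k + 1) = pvU nums k + 1 := by rw [pvU_succ nums k h]; simp [hc]
      have hule := pvU_le nums k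
      have hdrop : k + 1 - (pvU nums k + 1) = k - pvU nums k := by omega
      rw [hU, hdrop, List.take_add_one, pvGetElem?_drop_eq nums k (pvU nums k) hule hk]
      simp
    · rw [if_neg (by intro hcc; exact hc hcc.2)]
      have hU : pvU nums (k + 1) = 0 := by rw [pvU_succ nums k h]; simp [hc]
      rw [hU]; simp

theorem pvAright_eq (nums : List Int) : ∀ (m k : Nat), nums.length - k = m → k < nums.length → ∀ seq,
    pvAright nums (k : Int) seq = seq ++ (nums.drop (k + 1)).take (pvD nums k) := by
  intro m
  induction m with
  | zero => intro k hm hk seq; omega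
  | succ m ih =>
    intro k hm hk seq
    have e : ((k : Nat) : Int) + 1 = ((k + 1 : Nat) : Int) := by push_cast; ring
    rw [pvAright, e, pvAget_nat nums k, pvAget_nat nums (k + 1)]
    by_cases hc : k + 1 < nums.length ∧ pvG nums (k + 1) < pvG nums k
    · obtain ⟨hlt, hgt⟩ := hc
      rw [if_pos ⟨by omega, hgt⟩, ih (k + 1) (by omega) hlt (seq ++ [pvG nums (k + 1)])]
      have hD : pvD nums k = pvD nums (k + 1) + 1 := by rw [pvD_succ nums k hlt]; simp [hgt]
      rw [hD, List.drop_eq_getElem_cons hlt, List.take_succ_cons]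
      have hg : pvG nums (k + 1) = nums[k + 1] := by rw [pvG, List.getD_eq_getElem _ _ hlt]
      rw [hg]
      simp
    · have hnc : ¬(((k : Nat) : Int) < (nums.length : Int) - 1 ∧ pvG nums (k + 1) < pvG nums k) := by
        intro h'
        obtain ⟨ha, hb⟩ := h'
        exact hc ⟨by omega, hb⟩
      rw [if_neg hnc]
      have hD : pvD nums k = 0 := by
        by_cases hl : k + 1 < nums.length
        · rw [pvD_succ nums k hl]
          have : ¬ pvG nums (k + 1) < pvG nums k := fun hg => hc ⟨hl, hg⟩
          simp [this]
        · exact pvD_last nums k (by omega)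
      rw [hD]; simp

theorem pvSeq2_eq (nums : List Int) (k : Nat) (_h1 : 1 ≤ k) (h2 : k + 1 < nums.length) :
    pvAright nums (k : Int) (pvAleft nums (k : Int) [] ++ [pvAget nums (k : Int)]) =
      (nums.drop (k - pvU nums k)).take (pvU nums k + pvD nums k + 1) := by
  have hk : k < nums.length := by omega
  have hu := pvU_le nums k
  rw [pvAget_nat, pvAleft_eq nums k hk, pvAright_eq nums (nums.length - k) k rfl hk]
  have h1 : pvU nums k + pvD nums k + 1 = (pvU nums k + 1) + pvD nums k := by omega
  rw [h1, List.take_add]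
  have h2 : (nums.drop (k - pvU nums k)).drop (pvU nums k + 1) = nums.drop (k + 1) := by
    rw [List.drop_drop]; congr 1; omega
  rw [h2, List.take_add_one, pvGetElem?_drop_eq nums k (pvU nums k) hu hk]
  simp

theorem pvLoop_eq (nums : List Int) : ∀ (m k bl bs : Nat), nums.length - k = m → 1 ≤ k →
    bs + bl ≤ nums.length →
    pvAloop nums (k : Int) ((nums.drop bs).take bl) =
      (nums.drop (pvSel (pvUp nums) (pvDown nums) nums.length k bl bs).2).take
        (pvSel (pvUp nums) (pvDown nums) nums.length k bl bs).1 := by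
  intro m
  induction m with
  | zero =>
    intro k bl bs hm h1 hbl
    rw [pvAloop, pvSel, if_neg (by omega : ¬ ((k : Nat) : Int) < (nums.length : Int) - 1),
      if_neg (by omega : ¬ k < nums.length - 1)]
  | succ m ih =>
    intro k bl bs hm h1 hbl
    by_cases hkn : k + 1 < nums.length
    · rw [pvAloop, pvSel, if_pos (by omega : ((k : Nat) : Int) < (nums.length : Int) - 1),
        if_pos (by omega : k < nums.length - 1)]
      have e1 : ((k : Nat) : Int) - 1 = ((k - 1 : Nat) : Int) := by omega
      have e3 : ((k : Nat) : Int) + 1 = ((k + 1 : Nat) : Int) := by push_cast; ring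
      rw [e1, e3, pvAget_nat nums (k - 1), pvAget_nat nums k, pvAget_nat nums (k + 1)]
      have hU := pvU_succ nums (k - 1) (by omega)
      have ek : k - 1 + 1 = k := by omega
      rw [ek] at hU
      have hD := pvD_succ nums k hkn
      show (if pvG nums (k - 1) < pvG nums k ∧ pvG nums (k + 1) < pvG nums k then _ else _) = _
      by_cases hpk : pvG nums (k - 1) < pvG nums k ∧ pvG nums (k + 1) < pvG nums k
      · obtain ⟨ha, hb⟩ := hpk
        rw [if_pos ⟨ha, hb⟩]
        have hu0 : (pvUp nums).getD k 0 ≠ 0 := by show pvU nums k ≠ 0; rw [hU]; simp [ha]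
        have hd0 : (pvDown nums).getD k 0 ≠ 0 := by show pvD nums k ≠ 0; rw [hD]; simp [hb]
        have hseq := pvSeq2_eq nums k h1 hkn
        rw [pvAget_nat nums k] at hseq
        rw [hseq]
        have hule := pvU_le nums k
        have hdlt := pvD_lt nums k (by omega)
        have hlen1 : ((nums.drop (k - pvU nums k)).take (pvU nums k + pvD nums k + 1)).length
            = pvU nums k + pvD nums k + 1 := by
          rw [List.length_take, List.length_drop]; omega
        have hlen2 : ((nums.drop bs).take bl).length = bl := by
          rw [List.length_take, List.length_drop]; omega
        simp only [hlen1, hlen2]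
        by_cases himp : bl < pvU nums k + pvD nums k + 1
        · rw [if_pos himp, if_pos ⟨hu0, hd0, himp⟩]
          exact ih (k + 1) (pvU nums k + pvD nums k + 1) (k - pvU nums k) (by omega)
            (by omega) (by omega)
        · rw [if_neg himp,
            if_neg (by intro hx; exact himp hx.2.2)]
          exact ih (k + 1) bl bs (by omega) (by omega) hbl
      · rw [if_neg hpk]
        have hnb : ¬((pvUp nums).getD k 0 ≠ 0 ∧ (pvDown nums).getD k 0 ≠ 0 ∧
            bl < (pvUp nums).getD k 0 + (pvDown nums).getD k 0 + 1) := by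
          rintro ⟨x1, x2, -⟩
          apply hpk
          constructor
          · by_contra hna
            apply x1
            show pvU nums k = 0
            rw [hU]; simp [hna]
          · by_contra hnb
            apply x2
            show pvD nums k = 0
            rw [hD]; simp [hnb]
        rw [if_neg hnb]
        exact ih (k + 1) bl bs (by omega) (by omega) hbl
    · rw [pvAloop, pvSel, if_neg (by omega : ¬ ((k : Nat) : Int) < (nums.length : Int) - 1),
        if_neg (by omega : ¬ k < nums.length - 1)]

-- ===== VERDICT (by name: the statement is the Claim_ definition above) =====
theorem peek_sequence_spec : Claim_equal_peek_sequence := by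
  intro nums _
  unfold Spec_peek_sequence peek_sequence peek_sequence_alt
  have h := pvLoop_eq nums (nums.length - 1) 1 0 0 rfl (le_refl 1) (by omega)
  simp only [List.drop_zero, List.take_zero] at h
  rw [show ((1 : Int)) = ((1 : Nat) : Int) by norm_num, h]
  rw [PySem.List.slice_natCast_add]
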